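-- pv_equiv track=rewrite | github.com/LilyOfTheCosmos/ghost-in-m-sheet-Lily | tools/check_link_macros.py | target_has_unevaluated_macro
-- ===== SOURCE A (Python) =====
-- def target_has_unevaluated_macro(target):
--     """Return True if ``target`` contains ``<<...>>`` macro syntax that
--     SugarCube will treat as literal characters.
--
--     A target wrapped in backticks is a TwineScript expression — anything
--     inside is fine. Only ``<<`` occurrences outside of backtick segments
--     count as bugs.
--     """
--     if target is None:
--         return False
--     in_backtick = False
--     i = 0
--     n = len(target)
--     while i < n:
--         ch = target[i]
--         if ch == '`':
--             in_backtick = not in_backtick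
--             i += 1
--             continue
--         if not in_backtick and i + 1 < n and ch == '<' and target[i + 1] == '<':
--             return True
--         i += 1
--     return False
-- ===== SOURCE B (Python) =====
-- def target_has_unevaluated_macro(target):
--     if target is None:
--         return False
--     segments = target.split('`')
--     return any('<<' in seg for seg in segments[::2])
-- ===== Notes on version B (the rewrite author's own statement) =====
-- stated objective: faster
-- what changed: Replaces the index-based character loop with a backtick toggle flag by a split on the backtick character followed by a substring-membership test on the even-indexed (outside-backtick) segments.
import Mathlib
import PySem

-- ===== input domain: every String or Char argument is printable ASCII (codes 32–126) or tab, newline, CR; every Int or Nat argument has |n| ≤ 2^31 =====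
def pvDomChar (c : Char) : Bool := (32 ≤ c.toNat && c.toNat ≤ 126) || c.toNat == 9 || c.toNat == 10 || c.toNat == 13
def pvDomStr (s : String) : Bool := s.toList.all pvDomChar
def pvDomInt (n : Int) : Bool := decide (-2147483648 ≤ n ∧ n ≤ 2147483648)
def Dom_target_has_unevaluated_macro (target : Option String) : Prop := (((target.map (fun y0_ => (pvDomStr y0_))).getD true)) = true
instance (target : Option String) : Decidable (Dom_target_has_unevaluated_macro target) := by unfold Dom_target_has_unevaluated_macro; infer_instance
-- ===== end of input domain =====

-- B splits on the backtick character and tests '<<'-membership on the even-indexed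
-- (outside-backtick) segments instead of A's per-character toggle loop; the timing
-- run measured B faster (C-level split/substring test vs Python-level loop).

-- ===== PORT A =====
-- the while loop: index i advances one char at a time; `rest.head?` is target[i+1]
def pvLoopA : List Char → Bool → Bool
  | [], _ => false
  | c :: rest, in_backtick =>
    if c = '`' then pvLoopA rest (!in_backtick)
    else if !in_backtick && c = '<' && rest.head? = some '<' then true
    else pvLoopA rest in_backtick

def target_has_unevaluated_macro (target : Option String) : Bool :=
  match target with
  | none => false
  | some s => pvLoopA s.toList false

-- ===== PORT B =====
-- segments[::2] (step 2 over the split list)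
def pvEverySecond {α : Type} : List α → List α
  | [] => []
  | [a] => [a]
  | a :: _ :: rest => a :: pvEverySecond rest

def target_has_unevaluated_macro_alt (target : Option String) : Bool :=
  match target with
  | none => false
  | some s =>
    (pvEverySecond (s.toList.splitOn '`')).any (fun seg => PySem.Chars.isIn ['<', '<'] seg)

-- ===== PRECONDITION & SPEC =====
def Spec_target_has_unevaluated_macro (target : Option String) (out : Bool) : Prop := out = target_has_unevaluated_macro_alt target
instance (target : Option String) (out : Bool) : Decidable (Spec_target_has_unevaluated_macro target out) := by unfold Spec_target_has_unevaluated_macro; infer_instance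

-- ===== CLAIM (what is proved, stated in full; the proofs are below) =====
def Claim_equal_target_has_unevaluated_macro : Prop := ∀ (target : Option String), Dom_target_has_unevaluated_macro target → Spec_target_has_unevaluated_macro target (target_has_unevaluated_macro target)

-- ===== LEMMAS AND PROOFS =====

lemma pvEverySecond_cons {α : Type} (a : α) (l : List α) :
    pvEverySecond (a :: l) = a :: pvEverySecond (l.drop 1) := by
  cases l <;> simp [pvEverySecond]

lemma isIn_lt_lt_nil : PySem.Chars.isIn ['<', '<'] [] = false := by decide

-- '<<' in (c :: l)  ↔  match at the front, or '<<' in l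
lemma isIn_lt_lt_cons (c : Char) (l : List Char) :
    PySem.Chars.isIn ['<', '<'] (c :: l)
      = ((c = '<' && l.head? = some '<') || PySem.Chars.isIn ['<', '<'] l) := by
  rcases Bool.eq_false_or_eq_true (PySem.Chars.isIn ['<', '<'] (c :: l)) with h | h <;>
    rw [h] <;> symm
  · rw [PySem.Chars.isIn_iff_infix, List.infix_cons_iff] at h
    rcases h with h | h
    · cases l with
      | nil =>
        exfalso
        rcases h with ⟨t, ht⟩
        simp at ht
      | cons d l' =>
        rcases h with ⟨t, ht⟩
        simp only [List.cons_append] at ht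
        injection ht with h1 ht
        injection ht with h2 _
        subst h1; subst h2
        simp
    · rw [← PySem.Chars.isIn_iff_infix] at h
      simp [h]
  · rw [PySem.Chars.isIn_eq_false_iff, List.infix_cons_iff] at h
    push Not at h
    obtain ⟨h1, h2⟩ := h
    rw [Bool.or_eq_false_iff]
    refine ⟨?_, by rw [PySem.Chars.isIn_eq_false_iff]; exact h2⟩
    rw [Bool.and_eq_false_iff]
    by_cases hc : c = '<'
    · right
      subst hc
      cases l with
      | nil => simp
      | cons d l' =>
        simp only [List.head?_cons, decide_eq_false_iff_not, Option.some.injEq]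
        intro hd
        exact h1 (by simp [hd])
    · left; simp [hc]

-- head of the first segment of splitOn = head of the list, unless it is the separator
lemma head?_headI_splitOn (l : List Char) :
    ((l.splitOn '`').headI).head?
      = if l.head? = some '`' then none else l.head? := by
  cases l with
  | nil => simp [List.splitOn]
  | cons c rest =>
    by_cases hc : c = '`'
    · subst hc
      simp [List.splitOn, List.splitOnP_cons]
    · have hb : (c == '`') = false := by simp [hc]
      simp only [List.splitOn, List.splitOnP_cons, hb, Bool.false_eq_true, if_false,
        List.head?_cons]
      rcases h : (rest.splitOnP (· == '`')) with _ | ⟨s0, ss⟩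
      · exact absurd h (List.splitOnP_ne_nil _ _)
      · simp [hc]

-- the main invariant: the toggle loop equals B's check on the remaining segments,
-- starting inside (drop the first segment) or outside
lemma pvLoopA_eq_split (cs : List Char) (inb : Bool) :
    pvLoopA cs inb
      = (pvEverySecond ((cs.splitOn '`').drop (if inb then 1 else 0))).any
          (fun seg => PySem.Chars.isIn ['<', '<'] seg) := by
  induction cs generalizing inb with
  | nil =>
    cases inb <;> simp [pvLoopA, List.splitOn, pvEverySecond, isIn_lt_lt_nil]
  | cons c rest ih =>
    by_cases hc : c = '`'
    · subst hc
      have hsplit : (('`' :: rest).splitOn '`') = [] :: rest.splitOn '`' := by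
        simp [List.splitOn, List.splitOnP_cons]
      rw [show pvLoopA ('`' :: rest) inb = pvLoopA rest (!inb) by simp [pvLoopA], ih, hsplit]
      cases inb with
      | false => simp [pvEverySecond_cons, isIn_lt_lt_nil]
      | true => simp
    · have hbeq : (c == '`') = false := by simp [hc]
      have hsplit : ((c :: rest).splitOn '`')
          = (rest.splitOn '`').modifyHead (List.cons c) := by
        simp [List.splitOn, List.splitOnP_cons, hbeq]
      rcases h : rest.splitOn '`' with _ | ⟨s0, ss⟩
      · exact absurd h (List.splitOnP_ne_nil _ _)
      · cases inb with
        | true =>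
          have hl : pvLoopA (c :: rest) true = pvLoopA rest true := by simp [pvLoopA, hc]
          rw [hl, ih, hsplit, h]
          simp
        | false =>
          have hgoal : pvLoopA (c :: rest) false
              = ((c = '<' && rest.head? = some '<') || pvLoopA rest false) := by
            by_cases hm : c = '<' ∧ rest.head? = some '<'
            · simp [pvLoopA, hm.1, hm.2]
            · have hf : (c = '<' && rest.head? = some '<') = false := by
                rw [Bool.and_eq_false_iff]
                by_cases h1 : c = '<'
                · right; simpa using fun h2 => hm ⟨h1, by simp [h2]⟩
                · left; simp [h1]
              rw [hf, Bool.false_or]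
              simp only [pvLoopA, if_neg hc]
              rw [if_neg (by simp [hf])]
          rw [hgoal, ih, hsplit, h]
          simp only [show (if false = true then 1 else 0) = 0 from rfl] at *
          simp only [List.modifyHead, List.drop_zero, pvEverySecond_cons, List.any_cons]
          rw [isIn_lt_lt_cons]
          have hhead := head?_headI_splitOn rest
          rw [h] at hhead
          simp only [List.headI] at hhead
          by_cases hr : rest.head? = some '`'
          · have h0 : s0 = [] := List.head?_eq_none_iff.mp (by rw [hhead, if_pos hr])
            subst h0
            simp [hr, isIn_lt_lt_nil]
          · rw [show s0.head? = rest.head? from by rw [hhead, if_neg hr]]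
            simp [Bool.or_assoc]

-- ===== VERDICT (by name: the statement is the Claim_ definition above) =====
theorem target_has_unevaluated_macro_spec : Claim_equal_target_has_unevaluated_macro := by
  intro target _
  unfold Spec_target_has_unevaluated_macro target_has_unevaluated_macro target_has_unevaluated_macro_alt
  cases target with
  | none => rfl
  | some s =>
    simp only
    rw [pvLoopA_eq_split]
    simp
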